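-- pv_equiv track=rewrite | github.com/kh277/BOJ | 백준/Gold/5557. 1학년/1학년.py | solve
-- ===== SOURCE A (Python) =====
-- def solve(N: int, num: list) -> int:
--     DP = [[0 for _ in range(21)] for _ in range(N-1)]
--
--     # 초기값
--     DP[0][num[0]] = 1   # num[0]번째 수만을 이용해 num[0]을 만드는 경우의 수 1가지
--
--     for i in range(1, N-1):
--         for j in range(21):
--             if j-num[i] >= 0:
--                 DP[i][j] += DP[i-1][j-num[i]]
--             if j+num[i] <= 20:
--                 DP[i][j] += DP[i-1][j+num[i]]
--
--     return DP[N-2][num[N-1]]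
-- ===== SOURCE B (Python) =====
-- def solve(N: int, num: list) -> int:
--     # Meet in the middle: forward distribution from num[0] over the first half of
--     # the operands, backward distribution from num[N-1] over the reversed second
--     # half, combined by a dot product.
--     ops = num[1:N-1]
--     half = len(ops) // 2
--
--     def push(row, n):
--         nxt = [0] * 21
--         for v in range(21):
--             c = row[v]
--             if c:
--                 if v + n <= 20:
--                     nxt[v + n] += c
--                 if v - n >= 0:
--                     nxt[v - n] += c
--         return nxt
--
--     fwd = [0] * 21
--     fwd[num[0]] = 1
--     for n in ops[:half]:
--         fwd = push(fwd, n)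
--
--     bwd = [0] * 21
--     bwd[num[N - 1]] = 1
--     for n in reversed(ops[half:]):
--         bwd = push(bwd, n)
--
--     return sum(f * b for f, b in zip(fwd, bwd))
-- ===== Notes on version B (the rewrite author's own statement) =====
-- stated objective: alternative
-- what changed: Replaces A's single forward 2D pull-DP table with a meet-in-the-middle scheme: a forward reachability distribution from num[0] over the first half of the operands, a backward distribution from num[N-1] over the reversed second half (the +/- step relation is symmetric), and the answer obtained as the dot product of the two 21-cell distributions.
import Mathlib
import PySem

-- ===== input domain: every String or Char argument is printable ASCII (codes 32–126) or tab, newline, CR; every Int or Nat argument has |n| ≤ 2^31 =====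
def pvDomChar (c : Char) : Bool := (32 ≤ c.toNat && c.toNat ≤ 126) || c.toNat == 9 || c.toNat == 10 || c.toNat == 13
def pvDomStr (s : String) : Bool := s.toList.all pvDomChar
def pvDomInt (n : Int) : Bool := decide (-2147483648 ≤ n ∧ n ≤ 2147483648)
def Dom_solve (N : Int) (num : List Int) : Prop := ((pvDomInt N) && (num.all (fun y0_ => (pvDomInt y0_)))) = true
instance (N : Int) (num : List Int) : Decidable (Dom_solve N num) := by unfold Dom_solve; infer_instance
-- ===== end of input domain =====

-- B replaces A's single forward 2D pull-DP table with meet in the middle: a forward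
-- distribution from num[0] over the first half of the operands, a backward distribution
-- from num[N-1] over the reversed second half, combined by a dot product (objective:
-- alternative algorithm, same cost class).

-- ===== PORT A =====
-- 'for j in range(21)' body: both conditional '+=' writes into row i, reading row i-1
def aBody (num : List Int) (i : Int) (DP : List (List Int)) (j : Int) : List (List Int) :=
  let DP1 :=
    if 0 ≤ j - PySem.List.pyGetD num i 0 then
      PySem.List.pySetD DP i (PySem.List.pySetD (PySem.List.pyGetD DP i []) j
        (PySem.List.pyGetD (PySem.List.pyGetD DP i []) j 0 +
         PySem.List.pyGetD (PySem.List.pyGetD DP (i - 1) []) (j - PySem.List.pyGetD num i 0) 0))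
    else DP
  if j + PySem.List.pyGetD num i 0 ≤ 20 then
    PySem.List.pySetD DP1 i (PySem.List.pySetD (PySem.List.pyGetD DP1 i []) j
      (PySem.List.pyGetD (PySem.List.pyGetD DP1 i []) j 0 +
       PySem.List.pyGetD (PySem.List.pyGetD DP1 (i - 1) []) (j + PySem.List.pyGetD num i 0) 0))
  else DP1

def aRow (num : List Int) (DP : List (List Int)) (i : Int) : List (List Int) :=
  (PySem.List.pyRange 0 21 1).foldl (aBody num i) DP

def solve (N : Int) (num : List Int) : Int :=
  let DP : List (List Int) :=
    (PySem.List.pyRange 0 (N - 1) 1).map (fun _ => (PySem.List.pyRange 0 21 1).map (fun _ => (0 : Int)))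
  let DP := PySem.List.pySetD DP 0
    (PySem.List.pySetD (PySem.List.pyGetD DP 0 []) (PySem.List.pyGetD num 0 0) 1)
  let DP := (PySem.List.pyRange 1 (N - 1) 1).foldl (aRow num) DP
  PySem.List.pyGetD (PySem.List.pyGetD DP (N - 2) []) (PySem.List.pyGetD num (N - 1) 0) 0

-- ===== PORT B =====
-- 'def push(row, n)': one push pass over the 21 cells ('for v in range(21): c = row[v]; if c: ...')
def bPush (row : List Int) (n : Int) : List Int :=
  (PySem.List.pyRange 0 21 1).foldl
    (fun nxt v =>
      let c := PySem.List.pyGetD row v 0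
      if c ≠ 0 then
        let nxt1 := if v + n ≤ 20 then
            PySem.List.pySetD nxt (v + n) (PySem.List.pyGetD nxt (v + n) 0 + c)
          else nxt
        if 0 ≤ v - n then
          PySem.List.pySetD nxt1 (v - n) (PySem.List.pyGetD nxt1 (v - n) 0 + c)
        else nxt1
      else nxt)
    (PySem.List.pyRepeat [(0 : Int)] 21)

def solve_alt (N : Int) (num : List Int) : Int :=
  let ops := PySem.List.slice num (some 1) (some (N - 1))
  let half := PySem.Int.floordiv (PySem.List.len ops) 2
  let fwd := PySem.List.pySetD (PySem.List.pyRepeat [(0 : Int)] 21) (PySem.List.pyGetD num 0 0) 1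
  let fwd := (PySem.List.slice ops none (some half)).foldl bPush fwd
  let bwd := PySem.List.pySetD (PySem.List.pyRepeat [(0 : Int)] 21) (PySem.List.pyGetD num (N - 1) 0) 1
  let bwd := (PySem.List.slice ops (some half) none).reverse.foldl bPush bwd
  (fwd.zip bwd).foldl (fun acc p => acc + p.1 * p.2) 0

-- ===== PRECONDITION & SPEC =====
-- Pre_ is exactly the domain on which A returns: N ≥ 2, num long enough, first and last
-- number inside [-21, 20] (Python indexing into A's 21-cell rows accepts these; B's 21-cell
-- distributions accept exactly the same), and the middle numbers nonnegative (a negative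
-- middle number always makes A's row access overflow and raise IndexError).
def Pre_solve (N : Int) (num : List Int) : Prop :=
  2 ≤ N ∧ N ≤ (num.length : Int) ∧
  -21 ≤ num.getD 0 0 ∧ num.getD 0 0 ≤ 20 ∧
  -21 ≤ num.getD (N - 1).toNat 0 ∧ num.getD (N - 1).toNat 0 ≤ 20 ∧
  ∀ i ∈ PySem.List.pyRange 1 (N - 1) 1, 0 ≤ PySem.List.pyGetD num i 0

instance (N : Int) (num : List Int) : Decidable (Pre_solve N num) := by
  unfold Pre_solve; infer_instance

def pvWitness_solve : Int × List Int := (3, [1, 2, 0])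

def Spec_solve (N : Int) (num : List Int) (out : Int) : Prop := out = solve_alt N num
instance (N : Int) (num : List Int) (out : Int) : Decidable (Spec_solve N num out) := by unfold Spec_solve; infer_instance

-- ===== CLAIM (what is proved, stated in full; the proofs are below) =====
def Claim_equal_solve : Prop := ∀ (N : Int) (num : List Int), Dom_solve N num → Pre_solve N num → Spec_solve N num (solve N num)

-- ===== LEMMAS AND PROOFS =====

def pvBase (s : Int) : Int → Int := fun j => if j = s then 1 else 0

def pvStep (p : Int → Int) (n : Int) : Int → Int :=
  fun j => (if j ≤ 20 then p (j - n) else 0) + (if 0 ≤ j then p (j + n) else 0)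

def pvG (s : Int) (ns : List Int) : Int → Int := ns.foldl pvStep (pvBase s)

def pvMids (num : List Int) (b : Int) : List Int :=
  (PySem.List.pyRange 1 b 1).map (fun i => PySem.List.pyGetD num i 0)

def pvZeros : List Int := (PySem.List.pyRange 0 21 1).map (fun _ => (0 : Int))

theorem pvZeros_eq : pvZeros = List.replicate 21 0 := by decide

theorem pvG_append (s : Int) (ns : List Int) (n : Int) :
    pvG s (ns ++ [n]) = pvStep (pvG s ns) n := by
  simp [pvG]

theorem pvMids_succ (num : List Int) (b : Int) (hb : 1 ≤ b) :
    pvMids num (b + 1) = pvMids num b ++ [PySem.List.pyGetD num b 0] := by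
  unfold pvMids
  rw [PySem.List.pyRange_one_succ_right hb, List.map_append]
  rfl

theorem pvFold_outside' (ns : List Int) (p : Int → Int)
    (hp : ∀ j : Int, (j < 0 ∨ 20 < j) → p j = 0) (hns : ∀ n ∈ ns, 0 ≤ n) :
    ∀ j : Int, (j < 0 ∨ 20 < j) → (ns.foldl pvStep p) j = 0 := by
  induction ns generalizing p with
  | nil => exact hp
  | cons n ns ih =>
    intro j hj
    refine ih _ ?_ (fun x hx => hns x (List.mem_cons_of_mem _ hx)) j hj
    intro t ht
    have hn : 0 ≤ n := hns n (List.mem_cons_self ..)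
    unfold pvStep
    rcases ht with ht | ht
    · rw [if_neg (show ¬ (0:Int) ≤ t by omega), add_zero]
      split_ifs with h
      · exact hp _ (Or.inl (by omega))
      · rfl
    · rw [if_neg (show ¬ t ≤ (20:Int) by omega), zero_add]
      split_ifs with h
      · exact hp _ (Or.inr (by omega))
      · rfl

theorem pvG_outside {s : Int} {ns : List Int}
    (hs0 : 0 ≤ s) (hs1 : s ≤ 20) (hns : ∀ n ∈ ns, 0 ≤ n) :
    ∀ j : Int, (j < 0 ∨ 20 < j) → pvG s ns j = 0 := by
  refine pvFold_outside' ns (pvBase s) ?_ hns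
  intro j hj
  unfold pvBase
  rw [if_neg (by omega)]

theorem getD_set_lt {α : Type} (l : List α) (k m : Nat) (v d : α) (hk : k < l.length) :
    (l.set k v).getD m d = if m = k then v else l.getD m d := by
  by_cases h : m = k
  · subst h; simp [List.getD_eq_getElem?_getD, List.getElem?_set, hk]
  · simp [List.getD_eq_getElem?_getD, List.getElem?_set, Ne.symm h, h]

theorem pyGetD_int {α : Type} (xs : List α) (i : Int) (d : α) (h0 : 0 ≤ i)
    (h1 : i < (xs.length : Int)) : PySem.List.pyGetD xs i d = xs.getD i.toNat d := by
  rw [PySem.List.pyGetD_eq_getElem xs d h0 h1, List.getD_eq_getElem]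

theorem sum_map_if_eq_nodup (ks : List Int) (f : Int → Int) (c : Int) (h : ks.Nodup) :
    (ks.map (fun k => if k = c then f k else 0)).sum = if c ∈ ks then f c else 0 := by
  induction ks with
  | nil => simp
  | cons k ks ih =>
    rcases List.nodup_cons.mp h with ⟨hk, hnd⟩
    simp only [List.map_cons, List.sum_cons, ih hnd, List.mem_cons]
    by_cases hkc : k = c
    · subst hkc; simp [hk]
    · have hck : ¬ c = k := fun h => hkc h.symm
      simp [hkc, hck]

theorem pySetD_neg {α : Type} (xs : List α) (i : Int) (v : α)
    (h0 : -(xs.length : Int) ≤ i) (h1 : i < 0) :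
    PySem.List.pySetD xs i v = xs.set (xs.length - (-i).toNat) v := by
  unfold PySem.List.pySetD PySem.List.pySet? PySem.List.pyIdx?
  rw [if_neg (by omega), if_pos (by omega)]
  simp

theorem pyGetD_neg' {α : Type} (xs : List α) (i : Int) (d : α)
    (h0 : -(xs.length : Int) ≤ i) (h1 : i < 0) :
    PySem.List.pyGetD xs i d = xs.getD (xs.length - (-i).toNat) d := by
  have hk : 0 < (-i).toNat := by omega
  have hk2 : (-i).toNat ≤ xs.length := by omega
  have h := PySem.List.pyGetD_neg_natCast xs (-i).toNat d hk hk2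
  rw [show -(((-i).toNat : Nat) : Int) = i by omega] at h
  rw [h, List.getD_eq_getElem _ _ (by omega)]

def pvWrap (x : Int) : Int := if 0 ≤ x then x else x + 21

theorem pySetD_wrap21 (xs : List Int) (hlen : xs.length = 21) (i : Int) (v : Int)
    (h : -21 ≤ i) (h2 : i ≤ 20) :
    PySem.List.pySetD xs i v = xs.set (pvWrap i).toNat v := by
  unfold pvWrap
  by_cases h3 : 0 ≤ i
  · rw [if_pos h3, PySem.List.pySetD_of_nonneg _ _ h3]
  · rw [if_neg h3, pySetD_neg xs i v (by omega) (by omega)]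
    congr 1
    omega

theorem pyGetD_wrap21 (xs : List Int) (hlen : xs.length = 21) (i : Int) (d : Int)
    (h : -21 ≤ i) (h2 : i ≤ 20) :
    PySem.List.pyGetD xs i d = xs.getD (pvWrap i).toNat d := by
  unfold pvWrap
  by_cases h3 : 0 ≤ i
  · rw [if_pos h3, pyGetD_int xs i d h3 (by omega)]
  · rw [if_neg h3, pyGetD_neg' xs i d (by omega) (by omega)]
    congr 1
    omega

theorem pvWrap_bounds (i : Int) (h : -21 ≤ i) (h2 : i ≤ 20) :
    0 ≤ pvWrap i ∧ pvWrap i ≤ 20 := by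
  unfold pvWrap
  split_ifs <;> omega

-- a freshly initialised row: 1 at the (wrapped) start cell, 0 elsewhere
theorem init_row_getD (s : Int) (hs : -21 ≤ s) (hs2 : s ≤ 20) (j : Int)
    (hj0 : 0 ≤ j) (hj : j < 21) :
    PySem.List.pyGetD ((List.replicate 21 (0 : Int)).set (pvWrap s).toNat 1) j 0 =
      pvBase (pvWrap s) j := by
  obtain ⟨hw0, hw1⟩ := pvWrap_bounds s hs hs2
  rw [pyGetD_int _ j 0 hj0 (by simp; omega)]
  rw [getD_set_lt _ _ _ _ _ (by simp; omega)]
  unfold pvBase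
  by_cases hjs : j = pvWrap s
  · rw [if_pos (by omega), if_pos hjs]
  · rw [if_neg (by omega), if_neg hjs, List.getD_replicate]
    omega

-- ===== B-side lemmas =====

theorem bCell_step (n : Int) (vc : Int × Int) (new : List Int)
    (hn : 0 ≤ n) (hv0 : 0 ≤ vc.1) (hv1 : vc.1 ≤ 20) (hlen : new.length = 21) :
    ((if vc.2 ≠ 0 then
        let new1 := if vc.1 + n ≤ 20 then
            PySem.List.pySetD new (vc.1 + n) (PySem.List.pyGetD new (vc.1 + n) 0 + vc.2)
          else new
        if 0 ≤ vc.1 - n then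
          PySem.List.pySetD new1 (vc.1 - n) (PySem.List.pyGetD new1 (vc.1 - n) 0 + vc.2)
        else new1
      else new).length = 21) ∧
    (∀ j : Int, 0 ≤ j → j < 21 →
      PySem.List.pyGetD (if vc.2 ≠ 0 then
        let new1 := if vc.1 + n ≤ 20 then
            PySem.List.pySetD new (vc.1 + n) (PySem.List.pyGetD new (vc.1 + n) 0 + vc.2)
          else new
        if 0 ≤ vc.1 - n then
          PySem.List.pySetD new1 (vc.1 - n) (PySem.List.pyGetD new1 (vc.1 - n) 0 + vc.2)
        else new1
      else new) j 0 =
      PySem.List.pyGetD new j 0 +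
        ((if vc.1 + n ≤ 20 ∧ j = vc.1 + n then vc.2 else 0) +
         (if 0 ≤ vc.1 - n ∧ j = vc.1 - n then vc.2 else 0))) := by
  by_cases hc : vc.2 ≠ 0
  case neg =>
    rw [if_neg hc]
    refine ⟨hlen, ?_⟩
    intro j hj0 hj
    have hc0 : vc.2 = 0 := by omega
    rw [hc0]
    simp
  case pos =>
  rw [if_pos hc]
  simp only []
  by_cases h1 : vc.1 + n ≤ 20 <;> by_cases h2 : 0 ≤ vc.1 - n <;>
      simp only [h1, h2, if_true, if_false, ite_true, ite_false, if_pos, if_neg, not_false_iff]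
  · -- both writes
    rw [PySem.List.pySetD_of_nonneg _ _ (by omega : (0:Int) ≤ vc.1 + n),
        pyGetD_int new (vc.1 + n) 0 (by omega) (by omega)]
    set w1 := new.getD (vc.1 + n).toNat 0 + vc.2 with hw1
    set X := new.set (vc.1 + n).toNat w1 with hX
    have hXlen : X.length = 21 := by rw [hX, List.length_set, hlen]
    rw [PySem.List.pySetD_of_nonneg _ _ (h2 : (0:Int) ≤ vc.1 - n),
        pyGetD_int X (vc.1 - n) 0 h2 (by omega)]
    have hXb : X.getD (vc.1 - n).toNat 0 =
        if (vc.1 - n).toNat = (vc.1 + n).toNat then w1 else new.getD (vc.1 - n).toNat 0 := by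
      rw [hX, getD_set_lt _ _ _ _ _ (by omega)]
    refine ⟨by rw [List.length_set, hXlen], ?_⟩
    intro j hj0 hj
    rw [pyGetD_int _ j 0 hj0 (by rw [List.length_set, hXlen]; omega),
        getD_set_lt _ _ _ _ _ (by rw [hXlen]; omega),
        pyGetD_int new j 0 hj0 (by omega)]
    have hXj : ∀ m : Nat, m < 21 → X.getD m 0 = if m = (vc.1 + n).toNat then w1 else new.getD m 0 := by
      intro m hm
      rw [hX, getD_set_lt _ _ _ _ _ (by omega)]
    simp only [true_and]
    by_cases hb : j.toNat = (vc.1 - n).toNat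
    · rw [if_pos hb, hXb]
      by_cases hba : (vc.1 - n).toNat = (vc.1 + n).toNat
      · rw [if_pos hba, hw1, if_pos (show j = vc.1 + n by omega), if_pos (show j = vc.1 - n by omega)]
        rw [show new.getD (vc.1 + n).toNat 0 = new.getD j.toNat 0 by rw [show (vc.1 + n).toNat = j.toNat by omega]]
        ring
      · rw [if_neg hba, if_neg (show ¬ j = vc.1 + n by omega), if_pos (show j = vc.1 - n by omega)]
        rw [show new.getD (vc.1 - n).toNat 0 = new.getD j.toNat 0 by rw [hb]]
        ring
    · rw [if_neg hb, hXj j.toNat (by omega)]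
      by_cases hja : j.toNat = (vc.1 + n).toNat
      · rw [if_pos hja, hw1, if_pos (show j = vc.1 + n by omega), if_neg (show ¬ j = vc.1 - n by omega)]
        rw [show new.getD (vc.1 + n).toNat 0 = new.getD j.toNat 0 by rw [hja]]
        ring
      · rw [if_neg hja, if_neg (show ¬ j = vc.1 + n by omega), if_neg (show ¬ j = vc.1 - n by omega)]
        ring
  · -- only the first write
    rw [PySem.List.pySetD_of_nonneg _ _ (by omega : (0:Int) ≤ vc.1 + n),
        pyGetD_int new (vc.1 + n) 0 (by omega) (by omega)]
    set w1 := new.getD (vc.1 + n).toNat 0 + vc.2 with hw1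
    refine ⟨by rw [List.length_set, hlen], ?_⟩
    intro j hj0 hj
    rw [pyGetD_int _ j 0 hj0 (by rw [List.length_set]; omega),
        getD_set_lt _ _ _ _ _ (by omega),
        pyGetD_int new j 0 hj0 (by omega)]
    simp only [true_and, false_and, if_false, add_zero]
    by_cases hja : j.toNat = (vc.1 + n).toNat
    · rw [if_pos hja, hw1, if_pos (show j = vc.1 + n by omega)]
      rw [show new.getD (vc.1 + n).toNat 0 = new.getD j.toNat 0 by rw [hja]]
    · rw [if_neg hja, if_neg (show ¬ j = vc.1 + n by omega), add_zero]
  · -- only the second write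
    rw [PySem.List.pySetD_of_nonneg _ _ (h2 : (0:Int) ≤ vc.1 - n),
        pyGetD_int new (vc.1 - n) 0 h2 (by omega)]
    refine ⟨by rw [List.length_set, hlen], ?_⟩
    intro j hj0 hj
    rw [pyGetD_int _ j 0 hj0 (by rw [List.length_set]; omega),
        getD_set_lt _ _ _ _ _ (by omega),
        pyGetD_int new j 0 hj0 (by omega)]
    simp only [true_and, false_and, if_false, zero_add]
    by_cases hjb : j.toNat = (vc.1 - n).toNat
    · rw [if_pos hjb, if_pos (show j = vc.1 - n by omega)]
      rw [show new.getD (vc.1 - n).toNat 0 = new.getD j.toNat 0 by rw [hjb]]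
    · rw [if_neg hjb, if_neg (show ¬ j = vc.1 - n by omega), add_zero]
  · -- no write
    refine ⟨hlen, ?_⟩
    intro j hj0 hj
    simp

-- the fold over any pair list with in-range first components
theorem bFold_getD (n : Int) (hn : 0 ≤ n) (l : List (Int × Int))
    (hl : ∀ vc ∈ l, 0 ≤ vc.1 ∧ vc.1 ≤ 20) :
    ∀ (new : List Int), new.length = 21 →
      ((l.foldl (fun new vc =>
          if vc.2 ≠ 0 then
            let new1 := if vc.1 + n ≤ 20 then
                PySem.List.pySetD new (vc.1 + n) (PySem.List.pyGetD new (vc.1 + n) 0 + vc.2)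
              else new
            if 0 ≤ vc.1 - n then
              PySem.List.pySetD new1 (vc.1 - n) (PySem.List.pyGetD new1 (vc.1 - n) 0 + vc.2)
            else new1
          else new) new).length = 21) ∧
      (∀ j : Int, 0 ≤ j → j < 21 →
        PySem.List.pyGetD (l.foldl (fun new vc =>
          if vc.2 ≠ 0 then
            let new1 := if vc.1 + n ≤ 20 then
                PySem.List.pySetD new (vc.1 + n) (PySem.List.pyGetD new (vc.1 + n) 0 + vc.2)
              else new
            if 0 ≤ vc.1 - n then
              PySem.List.pySetD new1 (vc.1 - n) (PySem.List.pyGetD new1 (vc.1 - n) 0 + vc.2)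
            else new1
          else new) new) j 0 =
        PySem.List.pyGetD new j 0 +
          (l.map (fun vc =>
            (if vc.1 + n ≤ 20 ∧ j = vc.1 + n then vc.2 else 0) +
            (if 0 ≤ vc.1 - n ∧ j = vc.1 - n then vc.2 else 0))).sum) := by
  induction l with
  | nil => intro new hlen; exact ⟨hlen, by intro j _ _; simp⟩
  | cons vc l ih =>
    intro new hlen
    obtain ⟨hv0, hv1⟩ := hl vc (List.mem_cons_self ..)
    obtain ⟨hc1, hc2⟩ := bCell_step n vc new hn hv0 hv1 hlen
    simp only [List.foldl_cons]
    obtain ⟨ihL, ihV⟩ := ih (fun x hx => hl x (List.mem_cons_of_mem _ hx)) _ hc1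
    refine ⟨ihL, ?_⟩
    intro j hj0 hj
    rw [ihV j hj0 hj, hc2 j hj0 hj]
    simp only [List.map_cons, List.sum_cons]
    ring

theorem bPush_spec (n : Int) (hn : 0 ≤ n) (row : List Int) (hlen : row.length = 21)
    (p : Int → Int)
    (hp : ∀ j : Int, 0 ≤ j → j < 21 → PySem.List.pyGetD row j 0 = p j)
    (hp0 : ∀ j : Int, (j < 0 ∨ 20 < j) → p j = 0) :
    (bPush row n).length = 21 ∧
    (∀ j : Int, 0 ≤ j → j < 21 → PySem.List.pyGetD (bPush row n) j 0 = pvStep p n j) := by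
  have hmap : bPush row n =
      ((PySem.List.pyRange 0 21 1).map (fun v => (v, PySem.List.pyGetD row v 0))).foldl
        (fun new vc =>
          if vc.2 ≠ 0 then
            let new1 := if vc.1 + n ≤ 20 then
                PySem.List.pySetD new (vc.1 + n) (PySem.List.pyGetD new (vc.1 + n) 0 + vc.2)
              else new
            if 0 ≤ vc.1 - n then
              PySem.List.pySetD new1 (vc.1 - n) (PySem.List.pyGetD new1 (vc.1 - n) 0 + vc.2)
            else new1
          else new)
        (PySem.List.pyRepeat [(0 : Int)] 21) := by
    rw [List.foldl_map]
    rfl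
  rw [hmap]
  have hl : ∀ vc ∈ (PySem.List.pyRange 0 21 1).map (fun j => (j, PySem.List.pyGetD row j 0)),
      0 ≤ vc.1 ∧ vc.1 ≤ 20 := by
    intro vc hvc
    rw [List.mem_map] at hvc
    obtain ⟨v, hv, rfl⟩ := hvc
    rw [PySem.List.mem_pyRange_one] at hv
    constructor <;> omega
  have hinit : (PySem.List.pyRepeat [(0:Int)] 21).length = 21 := by
    rw [PySem.List.pyRepeat_singleton]
    simp
  obtain ⟨hL, hV⟩ := bFold_getD n hn _ hl (PySem.List.pyRepeat [(0:Int)] 21) hinit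
  refine ⟨hL, ?_⟩
  intro j hj0 hj
  rw [hV j hj0 hj]
  have hinit0 : PySem.List.pyGetD (PySem.List.pyRepeat [(0:Int)] 21) j 0 = 0 := by
    rw [PySem.List.pyRepeat_singleton, pyGetD_int _ j 0 hj0 (by simp; omega),
        List.getD_replicate]
    omega
  rw [hinit0, zero_add, List.map_map]
  have e1 : ∀ v ∈ PySem.List.pyRange 0 21 1,
      ((fun vc : Int × Int =>
          (if vc.1 + n ≤ 20 ∧ j = vc.1 + n then vc.2 else 0) +
          (if 0 ≤ vc.1 - n ∧ j = vc.1 - n then vc.2 else 0)) ∘ (fun v => (v, PySem.List.pyGetD row v 0))) v =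
      (fun v => if v = j - n then (if j ≤ 20 then p v else 0) else 0) v +
      (fun v => if v = j + n then (if 0 ≤ j then p v else 0) else 0) v := by
    intro v hv
    rw [PySem.List.mem_pyRange_one] at hv
    simp only [Function.comp]
    rw [hp v (by omega) (by omega)]
    congr 1 <;> split_ifs <;> first | rfl | omega
  rw [List.map_congr_left e1, PySem.List.sum_map_add_int,
      sum_map_if_eq_nodup _ _ _ (PySem.List.nodup_pyRange_one 0 21),
      sum_map_if_eq_nodup _ _ _ (PySem.List.nodup_pyRange_one 0 21)]
  unfold pvStep
  by_cases hm1 : (j - n) ∈ PySem.List.pyRange 0 21 1 <;>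
    by_cases hm2 : (j + n) ∈ PySem.List.pyRange 0 21 1
  · rw [if_pos hm1, if_pos hm2]
  · rw [if_pos hm1, if_neg hm2]
    rw [PySem.List.mem_pyRange_one] at hm2
    rw [hp0 (j + n) (by omega)]
    simp
  · rw [if_neg hm1, if_pos hm2]
    rw [PySem.List.mem_pyRange_one] at hm1
    rw [hp0 (j - n) (by omega)]
    simp
  · rw [if_neg hm1, if_neg hm2]
    rw [PySem.List.mem_pyRange_one] at hm1 hm2
    rw [hp0 (j - n) (by omega), hp0 (j + n) (by omega)]
    simp

-- folding push over a whole operand list tracks the abstract pvStep fold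
theorem rows_fold (ns : List Int) (hns : ∀ n ∈ ns, 0 ≤ n) :
    ∀ (row : List Int) (p : Int → Int), row.length = 21 →
      (∀ j : Int, 0 ≤ j → j < 21 → PySem.List.pyGetD row j 0 = p j) →
      (∀ j : Int, (j < 0 ∨ 20 < j) → p j = 0) →
      (ns.foldl bPush row).length = 21 ∧
      (∀ j : Int, 0 ≤ j → j < 21 →
        PySem.List.pyGetD (ns.foldl bPush row) j 0 = (ns.foldl pvStep p) j) := by
  induction ns with
  | nil => intro row p hlen hp _; exact ⟨hlen, fun j hj0 hj => hp j hj0 hj⟩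
  | cons n ns ih =>
    intro row p hlen hp hp0
    have hn : 0 ≤ n := hns n (List.mem_cons_self ..)
    obtain ⟨hL, hV⟩ := bPush_spec n hn row hlen p hp hp0
    have hstep0 : ∀ j : Int, (j < 0 ∨ 20 < j) → pvStep p n j = 0 := by
      have h := pvFold_outside' [n] p hp0 (by intro x hx; simp at hx; omega)
      simpa using h
    simpa using ih (fun x hx => hns x (List.mem_cons_of_mem _ hx)) (bPush row n) (pvStep p n) hL hV hstep0

-- a freshly initialised 21-cell distribution
theorem init_approx (s : Int) (hs0 : -21 ≤ s) (hs1 : s ≤ 20) :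
    (PySem.List.pySetD (PySem.List.pyRepeat [(0 : Int)] 21) s 1).length = 21 ∧
    (∀ j : Int, 0 ≤ j → j < 21 →
      PySem.List.pyGetD (PySem.List.pySetD (PySem.List.pyRepeat [(0 : Int)] 21) s 1) j 0 =
        pvBase (pvWrap s) j) := by
  have hinit : PySem.List.pySetD (PySem.List.pyRepeat [(0 : Int)] 21) s 1 =
      (List.replicate 21 (0 : Int)).set (pvWrap s).toNat 1 := by
    rw [PySem.List.pyRepeat_singleton, show ((21 : Int)).toNat = 21 by decide,
        pySetD_wrap21 _ (by simp) _ _ hs0 hs1]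
  rw [hinit]
  refine ⟨by simp, ?_⟩
  intro j hj0 hj
  exact init_row_getD s hs0 hs1 j hj0 hj

-- sums over integer ranges: shift, vanishing
theorem sum_shift (f : Int → Int) (k : Int) : ∀ (m : Nat) (a : Int),
    ((PySem.List.pyRange a (a + (m : Int)) 1).map (fun v => f (v + k))).sum =
    ((PySem.List.pyRange (a + k) (a + k + (m : Int)) 1).map f).sum := by
  intro m
  induction m with
  | zero =>
    intro a
    norm_num [PySem.List.pyRange_one_eq_nil]
  | succ m ih =>
    intro a
    have h1 : (((m + 1 : Nat)) : Int) = (m : Int) + 1 := by push_cast; ring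
    rw [h1, show a + ((m : Int) + 1) = (a + (m : Int)) + 1 by ring,
        PySem.List.pyRange_one_succ_right (by omega),
        show a + k + ((m : Int) + 1) = (a + k + (m : Int)) + 1 by ring,
        PySem.List.pyRange_one_succ_right (by omega),
        List.map_append, List.sum_append, List.map_append, List.sum_append, ih]
    simp only [List.map_cons, List.map_nil, List.sum_cons, List.sum_nil]
    rw [show a + (m : Int) + k = a + k + (m : Int) by ring]

theorem sum_zero_on (a b : Int) (f : Int → Int) (h : ∀ v : Int, a ≤ v → v < b → f v = 0) :
    ((PySem.List.pyRange a b 1).map f).sum = 0 := by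
  apply List.sum_eq_zero
  intro x hx
  rw [List.mem_map] at hx
  obtain ⟨v, hv, rfl⟩ := hx
  rw [PySem.List.mem_pyRange_one] at hv
  exact h v hv.1 hv.2

-- the shifted-pairing identity behind the adjointness of one push step
theorem shift_pair (p q : Int → Int) (n : Int) (hn : 0 ≤ n)
    (hp : ∀ j : Int, (j < 0 ∨ 20 < j) → p j = 0)
    (hq : ∀ j : Int, (j < 0 ∨ 20 < j) → q j = 0) :
    ((PySem.List.pyRange 0 21 1).map (fun v => p (v - n) * q v)).sum =
    ((PySem.List.pyRange 0 21 1).map (fun v => p v * q (v + n))).sum := by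
  by_cases h21 : 21 ≤ n
  · rw [sum_zero_on 0 21 _ (by intro v h0 h1; rw [hp (v - n) (Or.inl (by omega))]; ring),
        sum_zero_on 0 21 _ (by intro v h0 h1; rw [hq (v + n) (Or.inr (by omega))]; ring)]
  · have hsplitL : ((PySem.List.pyRange 0 21 1).map (fun v => p (v - n) * q v)).sum =
        ((PySem.List.pyRange n 21 1).map (fun v => p (v - n) * q v)).sum := by
      rw [PySem.List.pyRange_one_append 0 n 21 (by omega) (by omega), List.map_append,
          List.sum_append,
          sum_zero_on 0 n _ (by intro v h0 h1; rw [hp (v - n) (Or.inl (by omega))]; ring),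
          zero_add]
    have hsplitR : ((PySem.List.pyRange 0 21 1).map (fun v => p v * q (v + n))).sum =
        ((PySem.List.pyRange 0 (21 - n) 1).map (fun v => p v * q (v + n))).sum := by
      rw [PySem.List.pyRange_one_append 0 (21 - n) 21 (by omega) (by omega), List.map_append,
          List.sum_append,
          sum_zero_on (21 - n) 21 _ (by intro v h0 h1; rw [hq (v + n) (Or.inr (by omega))]; ring),
          add_zero]
    rw [hsplitL, hsplitR]
    have hshift := sum_shift (fun v => p (v - n) * q v) n (21 - n).toNat 0
    rw [show (0 : Int) + (((21 - n).toNat : Nat) : Int) = 21 - n by omega,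
        show (0 : Int) + n = n by ring,
        show n + (((21 - n).toNat : Nat) : Int) = 21 by omega] at hshift
    rw [← hshift]
    apply congrArg
    apply List.map_congr_left
    intro v _
    rw [show v + n - n = v by ring]

-- one push step is adjoint to itself under the 21-cell pairing
theorem step_adjoint (p q : Int → Int) (n : Int) (hn : 0 ≤ n)
    (hp : ∀ j : Int, (j < 0 ∨ 20 < j) → p j = 0)
    (hq : ∀ j : Int, (j < 0 ∨ 20 < j) → q j = 0) :
    ((PySem.List.pyRange 0 21 1).map (fun v => pvStep p n v * q v)).sum =
    ((PySem.List.pyRange 0 21 1).map (fun v => p v * pvStep q n v)).sum := by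
  have e1 : ∀ v ∈ PySem.List.pyRange 0 21 1,
      pvStep p n v * q v = p (v - n) * q v + p (v + n) * q v := by
    intro v hv
    rw [PySem.List.mem_pyRange_one] at hv
    unfold pvStep
    rw [if_pos (by omega : v ≤ 20), if_pos (by omega : (0:Int) ≤ v)]
    ring
  have e2 : ∀ v ∈ PySem.List.pyRange 0 21 1,
      p v * pvStep q n v = q (v - n) * p v + q (v + n) * p v := by
    intro v hv
    rw [PySem.List.mem_pyRange_one] at hv
    unfold pvStep
    rw [if_pos (by omega : v ≤ 20), if_pos (by omega : (0:Int) ≤ v)]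
    ring
  have hX : ((PySem.List.pyRange 0 21 1).map (fun v => p (v - n) * q v)).sum =
      ((PySem.List.pyRange 0 21 1).map (fun v => q (v + n) * p v)).sum := by
    rw [shift_pair p q n hn hp hq]
    apply congrArg
    apply List.map_congr_left
    intro v _
    ring
  have hY : ((PySem.List.pyRange 0 21 1).map (fun v => q (v - n) * p v)).sum =
      ((PySem.List.pyRange 0 21 1).map (fun v => p (v + n) * q v)).sum := by
    rw [shift_pair q p n hn hq hp]
    apply congrArg
    apply List.map_congr_left
    intro v _
    ring
  rw [List.map_congr_left e1, List.map_congr_left e2,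
      PySem.List.sum_map_add_int, PySem.List.sum_map_add_int, hX, hY]
  exact add_comm _ _

-- the meet-in-the-middle identity: a split pvG run is the dot product of the two halves
theorem pvG_split (s τ : Int) (hs0 : 0 ≤ s) (hs1 : s ≤ 20) (ht0 : 0 ≤ τ) (ht1 : τ ≤ 20) :
    ∀ (ys xs : List Int), (∀ n ∈ xs, 0 ≤ n) → (∀ n ∈ ys, 0 ≤ n) →
      pvG s (xs ++ ys) τ =
      ((PySem.List.pyRange 0 21 1).map (fun v => pvG s xs v * pvG τ ys.reverse v)).sum := by
  intro ys
  induction ys with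
  | nil =>
    intro xs hxs _
    simp only [List.append_nil, List.reverse_nil]
    have e : ∀ v ∈ PySem.List.pyRange 0 21 1,
        pvG s xs v * pvG τ [] v = (fun v => if v = τ then pvG s xs v else 0) v := by
      intro v hv
      show pvG s xs v * pvBase τ v = _
      unfold pvBase
      simp only []
      by_cases hvt : v = τ
      · rw [if_pos hvt, if_pos hvt, mul_one]
      · rw [if_neg hvt, if_neg hvt, mul_zero]
    rw [List.map_congr_left e, sum_map_if_eq_nodup _ _ _ (PySem.List.nodup_pyRange_one 0 21),
        if_pos (PySem.List.mem_pyRange_one.mpr ⟨ht0, by omega⟩)]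
  | cons n ys ih =>
    intro xs hxs hnys
    have hn : 0 ≤ n := hnys n (List.mem_cons_self ..)
    have hys : ∀ m ∈ ys, 0 ≤ m := fun m hm => hnys m (List.mem_cons_of_mem _ hm)
    have hxsn : ∀ m ∈ xs ++ [n], 0 ≤ m := by
      intro m hm
      rcases List.mem_append.mp hm with hm | hm
      · exact hxs m hm
      · simp at hm; omega
    have h1 : pvG s (xs ++ n :: ys) τ = pvG s ((xs ++ [n]) ++ ys) τ := by
      rw [List.append_cons]
    rw [h1, ih (xs ++ [n]) hxsn hys]
    have e3 : ∀ v ∈ PySem.List.pyRange 0 21 1,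
        pvG s (xs ++ [n]) v * pvG τ ys.reverse v =
        pvStep (pvG s xs) n v * pvG τ ys.reverse v := by
      intro v _
      rw [pvG_append]
    rw [List.map_congr_left e3,
        step_adjoint (pvG s xs) (pvG τ ys.reverse) n hn
          (pvG_outside hs0 hs1 hxs)
          (pvG_outside ht0 ht1 (by intro m hm; exact hys m (List.mem_reverse.mp hm)))]
    apply congrArg
    apply List.map_congr_left
    intro v _
    rw [List.reverse_cons, pvG_append]

-- the final dot product: zip-fold over two 21-cell lists as an indexed sum
theorem zip_dot (xs ys : List Int) (hx : xs.length = 21) (hy : ys.length = 21) :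
    (xs.zip ys).foldl (fun acc p => acc + p.1 * p.2) 0 =
    ((PySem.List.pyRange 0 21 1).map
      (fun v => PySem.List.pyGetD xs v 0 * PySem.List.pyGetD ys v 0)).sum := by
  have h1 : (xs.zip ys).foldl (fun acc p => acc + p.1 * p.2) 0 =
      0 + ((xs.zip ys).map (fun p => p.1 * p.2)).sum := by
    exact PySem.List.foldl_add (xs.zip ys) (fun p => p.1 * p.2) 0
  rw [h1, zero_add]
  apply congrArg
  apply List.ext_getElem
  · rw [List.length_map, List.length_zip, hx, hy, List.length_map,
        PySem.List.length_pyRange_one]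
    rfl
  · intro k hk1 hk2
    rw [List.length_map, List.length_zip, hx, hy] at hk1
    simp only [List.getElem_map, List.getElem_zip, PySem.List.getElem_pyRange_one]
    rw [show (0 : Int) + (k : Int) = ((k : Nat) : Int) by ring,
        PySem.List.pyGetD_natCast, PySem.List.pyGetD_natCast,
        List.getD_eq_getElem _ _ (by omega), List.getD_eq_getElem _ _ (by omega)]

-- the sliced operand list is exactly the middle segment pvMids
theorem ops_eq (N : Int) (num : List Int) (h2 : 2 ≤ N) (hlen : N ≤ (num.length : Int)) :
    PySem.List.slice num (some 1) (some (N - 1)) = pvMids num (N - 1) := by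
  rw [PySem.List.slice_of_nonneg num (by omega : (0:Int) ≤ 1) (by omega : 0 ≤ N - 1)
        (by omega : (1:Int) ≤ (num.length : Int)) (by omega : N - 1 ≤ (num.length : Int))]
  apply List.ext_getElem
  · rw [List.length_take, List.length_drop]
    unfold pvMids
    rw [List.length_map, PySem.List.length_pyRange_one]
    omega
  · intro k hk1 hk2
    rw [List.length_take, List.length_drop] at hk1
    have hk : k < (N - 2).toNat := by omega
    rw [List.getElem_take, List.getElem_drop]
    unfold pvMids
    simp only [List.getElem_map, PySem.List.getElem_pyRange_one]
    rw [pyGetD_int num (1 + (k : Int)) 0 (by omega) (by omega),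
        show ((1 : Int) + (k : Int)).toNat = 1 + k from by omega,
        List.getD_eq_getElem _ _ (by omega)]
    simp

-- ===== A-side lemmas =====

theorem aWrite (DP : List (List Int)) (i : Int) (j : Int) (w : Int)
    (hi0 : 0 ≤ i) (hiL : i < (DP.length : Int)) (hj0 : 0 ≤ j) :
    PySem.List.pySetD DP i (PySem.List.pySetD (PySem.List.pyGetD DP i []) j w) =
      DP.set i.toNat ((DP.getD i.toNat []).set j.toNat w) := by
  rw [pyGetD_int _ _ _ hi0 hiL, PySem.List.pySetD_of_nonneg _ _ hj0,
      PySem.List.pySetD_of_nonneg _ _ hi0]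

theorem aBody_eq (num : List Int) (i : Int) (DP : List (List Int)) (j : Int)
    (hi : 1 ≤ i) (hiL : i < (DP.length : Int))
    (hrow : (DP.getD i.toNat []).length = 21)
    (hj0 : 0 ≤ j) (hj21 : j < 21) :
    aBody num i DP j = DP.set i.toNat ((DP.getD i.toNat []).set j.toNat
      (PySem.List.pyGetD (DP.getD i.toNat []) j 0 +
       (if 0 ≤ j - PySem.List.pyGetD num i 0 then
          PySem.List.pyGetD (DP.getD (i.toNat - 1) []) (j - PySem.List.pyGetD num i 0) 0 else 0) +
       (if j + PySem.List.pyGetD num i 0 ≤ 20 then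
          PySem.List.pyGetD (DP.getD (i.toNat - 1) []) (j + PySem.List.pyGetD num i 0) 0 else 0))) := by
  have hi0 : (0:Int) ≤ i := by omega
  have hitL : i.toNat < DP.length := by omega
  have hjt : j.toNat < (DP.getD i.toNat []).length := by omega
  have hit1 : i.toNat - 1 ≠ i.toNat := by omega
  have hgi : PySem.List.pyGetD DP i [] = DP.getD i.toNat [] := pyGetD_int DP i [] hi0 hiL
  have hgi1 : PySem.List.pyGetD DP (i - 1) [] = DP.getD (i.toNat - 1) [] := by
    rw [pyGetD_int DP (i-1) [] (by omega) (by omega)]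
    congr 2
    omega
  set n := PySem.List.pyGetD num i 0 with hn'
  set r := DP.getD i.toNat [] with hr
  set prev := DP.getD (i.toNat - 1) [] with hprev
  unfold aBody
  simp only [← hn', ← hr, ← hprev]
  by_cases h1 : 0 ≤ j - n <;> by_cases h2 : j + n ≤ 20 <;>
      simp only [h1, h2, if_true, if_false, if_pos, if_neg, not_false_iff, ite_true, ite_false]
  · rw [aWrite DP i j _ hi0 hiL hj0, hgi, hgi1]
    set v1 := PySem.List.pyGetD r j 0 + PySem.List.pyGetD prev (j - n) 0 with hv1
    set X := DP.set i.toNat (r.set j.toNat v1) with hX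
    have hXL : (X.length : Int) = DP.length := by simp [hX]
    have eX : X.getD i.toNat [] = r.set j.toNat v1 := by
      rw [hX, getD_set_lt _ _ _ _ _ hitL, if_pos rfl]
    have e1 : PySem.List.pyGetD X i [] = r.set j.toNat v1 := by
      rw [pyGetD_int X i [] hi0 (by omega), eX]
    have e2 : PySem.List.pyGetD X (i - 1) [] = prev := by
      rw [pyGetD_int X (i-1) [] (by omega) (by omega), hX, getD_set_lt _ _ _ _ _ hitL,
          if_neg (by omega), hprev]
      congr 2
      omega
    have e4 : PySem.List.pyGetD (r.set j.toNat v1) j 0 = v1 := by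
      rw [pyGetD_int _ j 0 hj0 (by simp; omega), getD_set_lt _ _ _ _ _ hjt, if_pos rfl]
    rw [aWrite X i j _ hi0 (by omega) hj0, e1, e2, e4, eX, hX, List.set_set, List.set_set]
  · rw [aWrite DP i j _ hi0 hiL hj0, hgi, hgi1, add_zero]
  · rw [aWrite DP i j _ hi0 hiL hj0, hgi, hgi1, add_zero]
  · have hrj : r.set j.toNat (PySem.List.pyGetD r j 0 + 0 + 0) = r := by
      rw [add_zero, add_zero, pyGetD_int r j 0 hj0 (by omega), List.getD_eq_getElem _ _ hjt,
          List.set_getElem_self]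
    rw [hrj, hr, List.getD_eq_getElem _ _ hitL, List.set_getElem_self]

theorem aRow_aux (num : List Int) (i : Int) (DP : List (List Int)) (p : Int → Int)
    (hi : 1 ≤ i) (hiL : i < (DP.length : Int))
    (hzero : DP.getD i.toNat [] = pvZeros)
    (hprevlen : (DP.getD (i.toNat - 1) []).length = 21)
    (hn : 0 ≤ PySem.List.pyGetD num i 0)
    (hp0 : ∀ j : Int, (j < 0 ∨ 20 < j) → p j = 0)
    (hprev : ∀ j : Int, 0 ≤ j → j < 21 → PySem.List.pyGetD (DP.getD (i.toNat - 1) []) j 0 = p j) :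
    ∀ m : Nat, m ≤ 21 →
    ((PySem.List.pyRange 0 (m : Int) 1).foldl (aBody num i) DP).length = DP.length ∧
    (∀ k : Nat, k ≠ i.toNat →
      ((PySem.List.pyRange 0 (m : Int) 1).foldl (aBody num i) DP).getD k [] = DP.getD k []) ∧
    ((((PySem.List.pyRange 0 (m : Int) 1).foldl (aBody num i) DP).getD i.toNat []).length = 21) ∧
    (∀ j : Int, 0 ≤ j → j < (m : Int) →
      PySem.List.pyGetD (((PySem.List.pyRange 0 (m : Int) 1).foldl (aBody num i) DP).getD i.toNat []) j 0 =
        pvStep p (PySem.List.pyGetD num i 0) j) ∧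
    (∀ j : Int, (m : Int) ≤ j → j < 21 →
      PySem.List.pyGetD (((PySem.List.pyRange 0 (m : Int) 1).foldl (aBody num i) DP).getD i.toNat []) j 0 = 0) := by
  intro m
  induction m with
  | zero =>
    intro _
    have hr : PySem.List.pyRange 0 ((0:Nat) : Int) 1 = [] := by
      norm_num [PySem.List.pyRange_one_eq_nil]
    rw [hr]
    simp only [List.foldl_nil]
    refine ⟨?_, ?_, ?_, ?_, ?_⟩
    · trivial
    · intro k _; trivial
    · rw [hzero, pvZeros_eq]; simp
    · intro j hj0 hj; exfalso; omega
    · intro j hj0 hj21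
      rw [hzero, pvZeros_eq, pyGetD_int _ j 0 (by omega) (by simp; omega)]
      rw [List.getD_replicate]
      omega
  | succ m ih =>
    intro hm21
    obtain ⟨ihL, ihK, ihR, ihV, ihZ⟩ := ih (by omega)
    have hcast : ((m + 1 : Nat) : Int) = (m : Int) + 1 := by push_cast; ring
    have h0m : (0 : Int) ≤ (m : Int) := by omega
    rw [hcast, PySem.List.pyRange_one_succ_right h0m, List.foldl_append]
    simp only [List.foldl_cons, List.foldl_nil]
    set DPm := (PySem.List.pyRange 0 (m : Int) 1).foldl (aBody num i) DP with hDPm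
    set n := PySem.List.pyGetD num i 0 with hn'
    have hb := aBody_eq num i DPm (m : Int) hi (by omega) (by exact ihR) h0m (by omega)
    rw [← hn'] at hb
    have hprevrow : DPm.getD (i.toNat - 1) [] = DP.getD (i.toNat - 1) [] := ihK _ (by omega)
    have hcell : ∀ j : Int, 0 ≤ j → j < 21 → j.toNat < (DPm.getD i.toNat []).length := by
      intro j a b; omega
    have hnewval :
        PySem.List.pyGetD (DPm.getD i.toNat []) (m : Int) 0 +
        (if 0 ≤ (m : Int) - n then PySem.List.pyGetD (DPm.getD (i.toNat - 1) []) ((m : Int) - n) 0 else 0) +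
        (if (m : Int) + n ≤ 20 then PySem.List.pyGetD (DPm.getD (i.toNat - 1) []) ((m : Int) + n) 0 else 0) =
        pvStep p n (m : Int) := by
      rw [ihZ (m : Int) (le_refl _) (by omega), hprevrow]
      have e1 : (if 0 ≤ (m : Int) - n then PySem.List.pyGetD (DP.getD (i.toNat - 1) []) ((m : Int) - n) 0 else 0) = p ((m : Int) - n) := by
        split_ifs with h
        · exact hprev _ h (by omega)
        · exact (hp0 _ (Or.inl (by omega))).symm
      have e2 : (if (m : Int) + n ≤ 20 then PySem.List.pyGetD (DP.getD (i.toNat - 1) []) ((m : Int) + n) 0 else 0) = p ((m : Int) + n) := by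
        split_ifs with h
        · exact hprev _ (by omega) (by omega)
        · exact (hp0 _ (Or.inr (by omega))).symm
      rw [e1, e2, pvStep]
      rw [if_pos (by omega : (m:Int) ≤ 20), if_pos h0m]
      ring
    rw [hb]
    have hitL : i.toNat < DPm.length := by omega
    refine ⟨by simp [ihL], ?_, ?_, ?_, ?_⟩
    · intro k hk
      rw [getD_set_lt _ _ _ _ _ hitL, if_neg hk]
      exact ihK k hk
    · rw [getD_set_lt _ _ _ _ _ hitL, if_pos rfl, List.length_set]
      exact ihR
    · intro j hj0 hj
      rw [getD_set_lt _ _ _ _ _ hitL, if_pos rfl]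
      rw [pyGetD_int _ j 0 hj0 (by simp only [List.length_set]; omega)]
      by_cases hjm : j = (m : Int)
      · subst hjm
        rw [getD_set_lt _ _ _ _ _ (hcell _ hj0 (by omega)), if_pos rfl, hnewval]
      · rw [getD_set_lt _ _ _ _ _ (hcell ((m:Int)) h0m (by omega)), if_neg (by omega)]
        rw [← pyGetD_int _ j 0 hj0 (by omega)]
        exact ihV j hj0 (by omega)
    · intro j hj hj21
      rw [getD_set_lt _ _ _ _ _ hitL, if_pos rfl]
      rw [pyGetD_int _ j 0 (by omega) (by simp only [List.length_set]; omega)]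
      rw [getD_set_lt _ _ _ _ _ (hcell ((m:Int)) h0m (by omega)), if_neg (by omega)]
      rw [← pyGetD_int _ j 0 (by omega) (by omega)]
      exact ihZ j (by omega) hj21

def pvDP0 (N : Int) : List (List Int) :=
  (PySem.List.pyRange 0 (N - 1) 1).map (fun _ => (PySem.List.pyRange 0 21 1).map (fun _ => (0 : Int)))

def pvDP1 (N : Int) (num : List Int) : List (List Int) :=
  PySem.List.pySetD (pvDP0 N) 0
    (PySem.List.pySetD (PySem.List.pyGetD (pvDP0 N) 0 []) (PySem.List.pyGetD num 0 0) 1)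

theorem pvDP0_length (N : Int) : (pvDP0 N).length = (N - 1).toNat := by
  simp [pvDP0, PySem.List.length_pyRange_one]

theorem pvDP0_getD (N : Int) (k : Nat) (hk : k < (N - 1).toNat) : (pvDP0 N).getD k [] = pvZeros := by
  rw [pvDP0, List.getD_eq_getElem _ _ (by simp [PySem.List.length_pyRange_one]; omega)]
  rw [List.getElem_map]
  rfl

theorem a_loop (N : Int) (num : List Int) (hN : 2 ≤ N)
    (hs0 : -21 ≤ num.getD 0 0) (hs1 : num.getD 0 0 ≤ 20)
    (hmid : ∀ i ∈ PySem.List.pyRange 1 (N - 1) 1, 0 ≤ PySem.List.pyGetD num i 0)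
    (m : Nat) (hm : 1 + (m : Int) ≤ N - 1) :
    ((PySem.List.pyRange 1 (1 + (m : Int)) 1).foldl (aRow num) (pvDP1 N num)).length = (N - 1).toNat ∧
    (∀ k : Nat, k < (N - 1).toNat →
      ((((PySem.List.pyRange 1 (1 + (m : Int)) 1).foldl (aRow num) (pvDP1 N num)).getD k []).length = 21)) ∧
    (∀ j : Int, 0 ≤ j → j < 21 →
      PySem.List.pyGetD (((PySem.List.pyRange 1 (1 + (m : Int)) 1).foldl (aRow num) (pvDP1 N num)).getD m []) j 0 =
        pvG (pvWrap (num.getD 0 0)) (pvMids num (1 + (m : Int))) j) ∧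
    (∀ k : Nat, m < k → k < (N - 1).toNat →
      ((PySem.List.pyRange 1 (1 + (m : Int)) 1).foldl (aRow num) (pvDP1 N num)).getD k [] = pvZeros) := by
  have hs' : PySem.List.pyGetD num 0 0 = num.getD 0 0 := PySem.List.pyGetD_zero num 0
  have hL1 : (pvDP1 N num).length = (N - 1).toNat := by
    rw [pvDP1, PySem.List.pySetD_of_nonneg _ _ (le_refl 0), List.length_set, pvDP0_length]
  have hlen1 : (0:Int) < ((N-1).toNat : Int) := by omega
  obtain ⟨hw0, hw1⟩ := pvWrap_bounds (num.getD 0 0) hs0 hs1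
  have hDP1 : pvDP1 N num = (pvDP0 N).set 0 (pvZeros.set (pvWrap (num.getD 0 0)).toNat 1) := by
    rw [pvDP1, PySem.List.pySetD_of_nonneg _ _ (le_refl 0),
        pyGetD_int _ 0 _ (le_refl 0) (by rw [pvDP0_length]; omega)]
    simp only [Int.toNat_zero]
    rw [pvDP0_getD N 0 (by omega),
        pySetD_wrap21 pvZeros (by rw [pvZeros_eq]; simp) _ _ (by omega) (by omega), hs']
  have hget1 : ∀ k : Nat, k < (N - 1).toNat → (pvDP1 N num).getD k [] =
      (if k = 0 then pvZeros.set (pvWrap (num.getD 0 0)).toNat 1 else pvZeros) := by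
    intro k hk
    rw [hDP1, getD_set_lt _ _ _ _ _ (by rw [pvDP0_length]; omega)]
    split_ifs with h
    · rfl
    · exact pvDP0_getD N k hk
  induction m with
  | zero =>
    have hr : PySem.List.pyRange 1 (1 + ((0:Nat) : Int)) 1 = [] := by
      norm_num [PySem.List.pyRange_one_eq_nil]
    rw [hr]
    simp only [List.foldl_nil]
    refine ⟨hL1, ?_, ?_, ?_⟩
    · intro k hk
      rw [hget1 k hk]
      split_ifs <;> simp [pvZeros_eq]
    · intro j hj0 hj21
      rw [hget1 0 (by omega), if_pos rfl]
      have hml : pvMids num (1 + ((0:Nat) : Int)) = [] := by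
        norm_num [pvMids, PySem.List.pyRange_one_eq_nil]
      rw [hml, pvZeros_eq]
      exact init_row_getD (num.getD 0 0) hs0 hs1 j hj0 hj21
    · intro k hk0 hk
      rw [hget1 k hk, if_neg (by omega)]
  | succ m ih =>
    obtain ⟨ihL, ihK, ihV, ihZ⟩ := ih (by omega)
    have hcast : (1 + ((m + 1 : Nat)) : Int) = (1 + (m : Int)) + 1 := by push_cast; ring
    have h11m : (1:Int) ≤ 1 + (m : Int) := by omega
    rw [hcast, PySem.List.pyRange_one_succ_right h11m, List.foldl_append]
    simp only [List.foldl_cons, List.foldl_nil]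
    set DPm := (PySem.List.pyRange 1 (1 + (m : Int)) 1).foldl (aRow num) (pvDP1 N num) with hDPm
    have hmem : (1 + (m : Int)) ∈ PySem.List.pyRange 1 (N - 1) 1 := by
      rw [PySem.List.mem_pyRange_one]
      omega
    have hmids0 : ∀ x ∈ pvMids num (1 + (m : Int)), 0 ≤ x := by
      intro x hx
      rw [pvMids, List.mem_map] at hx
      obtain ⟨i', hi', rfl⟩ := hx
      rw [PySem.List.mem_pyRange_one] at hi'
      exact hmid i' (by rw [PySem.List.mem_pyRange_one]; omega)
    have haux := aRow_aux num (1 + (m : Int)) DPm (pvG (pvWrap (num.getD 0 0)) (pvMids num (1 + (m : Int))))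
      (by omega) (by omega)
      (by rw [show ((1 + (m:Int)).toNat) = m + 1 by omega]; exact ihZ (m+1) (by omega) (by omega))
      (by rw [show ((1 + (m:Int)).toNat - 1) = m by omega]; exact ihK m (by omega))
      (hmid _ hmem)
      (pvG_outside hw0 hw1 hmids0)
      (by rw [show ((1 + (m:Int)).toNat - 1) = m by omega]; exact ihV)
      21 (le_refl _)
    rw [show (((21:Nat)):Int) = (21:Int) by norm_num] at haux
    obtain ⟨auxL, auxK, auxR, auxV, _⟩ := haux
    have hrowfold : aRow num DPm (1 + (m : Int)) = (PySem.List.pyRange 0 21 1).foldl (aBody num (1 + (m : Int))) DPm := rfl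
    rw [hrowfold]
    have hit : ((1 + (m:Int)).toNat) = m + 1 := by omega
    refine ⟨by rw [auxL, ihL], ?_, ?_, ?_⟩
    · intro k hk
      by_cases hki : k = (1 + (m:Int)).toNat
      · rw [hki]; exact auxR
      · rw [auxK k hki]; exact ihK k hk
    · intro j hj0 hj21
      rw [show ((m+1 : Nat)) = (1 + (m:Int)).toNat from hit.symm]
      rw [auxV j hj0 (by omega)]
      rw [pvMids_succ num _ h11m, pvG_append]
    · intro k hk1 hk2
      rw [auxK k (by omega)]
      exact ihZ k (by omega) hk2

theorem solve_eq (N : Int) (num : List Int) :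
    solve N num =
      PySem.List.pyGetD
        (PySem.List.pyGetD ((PySem.List.pyRange 1 (N - 1) 1).foldl (aRow num) (pvDP1 N num)) (N - 2) [])
        (PySem.List.pyGetD num (N - 1) 0) 0 := rfl

theorem final (N : Int) (num : List Int) (hpre : Pre_solve N num) :
    solve N num = solve_alt N num := by
  obtain ⟨hN, hlen, hfs0, hfs1, ht0, ht1, hmid⟩ := hpre
  have ht' : PySem.List.pyGetD num (N - 1) 0 = num.getD (N - 1).toNat 0 :=
    pyGetD_int num (N - 1) 0 (by omega) (by omega)
  have hs' : PySem.List.pyGetD num 0 0 = num.getD 0 0 := PySem.List.pyGetD_zero num 0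
  set s0 := num.getD 0 0 with hs0def
  set t := num.getD (N - 1).toNat 0 with htdef
  obtain ⟨hws0, hws1⟩ := pvWrap_bounds s0 hfs0 hfs1
  obtain ⟨hwt0, hwt1⟩ := pvWrap_bounds t ht0 ht1
  set mids := pvMids num (N - 1) with hmidsdef
  have hmids0 : ∀ x ∈ mids, 0 ≤ x := by
    intro x hx
    rw [hmidsdef, pvMids, List.mem_map] at hx
    obtain ⟨i', hi', rfl⟩ := hx
    exact hmid i' hi'
  have hm1 : (1 : Int) + ((N - 2).toNat : Int) = N - 1 := by omega
  -- A side: the read cell is pvG (pvWrap s0) mids (pvWrap t)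
  obtain ⟨aL, aK, aV, _⟩ := a_loop N num hN hfs0 hfs1 hmid (N - 2).toNat (by omega)
  rw [hm1] at aL aK aV
  have hrowlen : (((PySem.List.pyRange 1 (N - 1) 1).foldl (aRow num) (pvDP1 N num)).getD (N - 2).toNat []).length = 21 :=
    aK (N - 2).toNat (by omega)
  have hA : solve N num = pvG (pvWrap s0) mids (pvWrap t) := by
    rw [solve_eq, ht']
    rw [pyGetD_int _ (N - 2) [] (by omega) (by rw [aL]; omega)]
    rw [pyGetD_wrap21 _ hrowlen t 0 (by omega) (by omega)]
    rw [← pyGetD_int _ (pvWrap t) 0 (by omega) (by rw [hrowlen]; omega)]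
    exact aV (pvWrap t) (by omega) (by omega)
  -- B side
  have hops : PySem.List.slice num (some 1) (some (N - 1)) = mids := ops_eq N num hN hlen
  have hmlen : (mids.length : Int) = N - 2 := by
    rw [hmidsdef, pvMids, List.length_map, PySem.List.length_pyRange_one]
    omega
  have hhalf0 : 0 ≤ PySem.Int.floordiv (PySem.List.len mids) 2 := by
    rw [PySem.List.len_eq, PySem.Int.floordiv_eq_ediv_of_pos (by omega)]
    positivity
  set half := PySem.Int.floordiv (PySem.List.len mids) 2 with hhalfdef
  have htake : PySem.List.slice mids none (some half) = mids.take half.toNat :=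
    PySem.List.slice_to mids hhalf0
  have hdrop : PySem.List.slice mids (some half) none = mids.drop half.toNat :=
    PySem.List.slice_from mids hhalf0
  have hB0 : solve_alt N num =
      ((((PySem.List.slice (PySem.List.slice num (some 1) (some (N - 1))) none
            (some (PySem.Int.floordiv (PySem.List.len (PySem.List.slice num (some 1) (some (N - 1)))) 2))).foldl bPush
          (PySem.List.pySetD (PySem.List.pyRepeat [(0 : Int)] 21) (PySem.List.pyGetD num 0 0) 1)).zip
        (((PySem.List.slice (PySem.List.slice num (some 1) (some (N - 1)))
            (some (PySem.Int.floordiv (PySem.List.len (PySem.List.slice num (some 1) (some (N - 1)))) 2)) none).reverse).foldl bPush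
          (PySem.List.pySetD (PySem.List.pyRepeat [(0 : Int)] 21) (PySem.List.pyGetD num (N - 1) 0) 1))).foldl
        (fun acc p => acc + p.1 * p.2) 0) := rfl
  have hBdef : solve_alt N num =
      ((((mids.take half.toNat).foldl bPush
          (PySem.List.pySetD (PySem.List.pyRepeat [(0 : Int)] 21) s0 1)).zip
        (((mids.drop half.toNat).reverse).foldl bPush
          (PySem.List.pySetD (PySem.List.pyRepeat [(0 : Int)] 21) t 1))).foldl
        (fun acc p => acc + p.1 * p.2) 0) := by
    rw [hB0, hops, ← hhalfdef, htake, hdrop, hs', ht']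
  -- forward distribution
  obtain ⟨fi_len, fi_val⟩ := init_approx s0 hfs0 hfs1
  have hbase0 : ∀ j : Int, (j < 0 ∨ 20 < j) → pvBase (pvWrap s0) j = 0 := by
    intro j hj
    simp only [pvBase]
    rw [if_neg (by omega)]
  obtain ⟨fL, fV⟩ := rows_fold (mids.take half.toNat)
    (fun x hx => hmids0 x (List.mem_of_mem_take hx))
    (PySem.List.pySetD (PySem.List.pyRepeat [(0 : Int)] 21) s0 1) (pvBase (pvWrap s0))
    fi_len fi_val hbase0
  -- backward distribution
  obtain ⟨bi_len, bi_val⟩ := init_approx t ht0 ht1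
  have hbaset0 : ∀ j : Int, (j < 0 ∨ 20 < j) → pvBase (pvWrap t) j = 0 := by
    intro j hj
    simp only [pvBase]
    rw [if_neg (by omega)]
  obtain ⟨bL, bV⟩ := rows_fold ((mids.drop half.toNat).reverse)
    (fun x hx => hmids0 x (List.mem_of_mem_drop (List.mem_reverse.mp hx)))
    (PySem.List.pySetD (PySem.List.pyRepeat [(0 : Int)] 21) t 1) (pvBase (pvWrap t))
    bi_len bi_val hbaset0
  -- combine
  rw [hA, hBdef, zip_dot _ _ fL bL]
  have e : ∀ v ∈ PySem.List.pyRange 0 21 1,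
      PySem.List.pyGetD ((mids.take half.toNat).foldl bPush
          (PySem.List.pySetD (PySem.List.pyRepeat [(0 : Int)] 21) s0 1)) v 0 *
      PySem.List.pyGetD (((mids.drop half.toNat).reverse).foldl bPush
          (PySem.List.pySetD (PySem.List.pyRepeat [(0 : Int)] 21) t 1)) v 0 =
      pvG (pvWrap s0) (mids.take half.toNat) v * pvG (pvWrap t) (mids.drop half.toNat).reverse v := by
    intro v hv
    rw [PySem.List.mem_pyRange_one] at hv
    rw [fV v (by omega) (by omega), bV v (by omega) (by omega)]
    rfl
  rw [List.map_congr_left e,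
      ← pvG_split (pvWrap s0) (pvWrap t) hws0 hws1 hwt0 hwt1
          (mids.drop half.toNat) (mids.take half.toNat)
          (fun x hx => hmids0 x (List.mem_of_mem_take hx))
          (fun x hx => hmids0 x (List.mem_of_mem_drop hx)),
      List.take_append_drop]

-- ===== VERDICT (by name: the statement is the Claim_ definition above) =====
theorem solve_spec : Claim_equal_solve := by
  intro N num _ hpre
  exact final N num hpre
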